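/- GENERATED by c/gen_decode.py: decode facts of the image, one per distinct instruction byte string. -/
import UserX.DecodeImage

#decode_all Gif.Dec
  "0f841b010000"  -- je 1095e6
  "0f845cffffff"  -- je 10a81f
  "0f84a6000000"  -- je 107c41
  "0f84e1000000"  -- je 1088cb
  "0f85b4000000"  -- jne 10886d
  "0f8ec8010000"  -- jle 10a914
  "0f92c2"  -- setb dl
  "0fafd9"  -- imul ebx,ecx
  "0fb6442421"  -- movzx eax,BYTE PTR [rsp+0x21]
  "0fb67310"  -- movzx esi,BYTE PTR [rbx+0x10]
  "39e8"  -- cmp eax,ebp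
  "3dff0f0000"  -- cmp eax,0xfff
  "410fb61424"  -- movzx edx,BYTE PTR [r12]
  "41807c241000"  -- cmp BYTE PTR [r12+0x10],0x0
  "4183e407"  -- and r12d,0x7
  "418807"  -- mov BYTE PTR [r15],al
  "41895c2414"  -- mov DWORD PTR [r12+0x14],ebx
  "4189cc"  -- mov r12d,ecx
  "418b442420"  -- mov eax,DWORD PTR [r12+0x20]
  "418b542408"  -- mov edx,DWORD PTR [r12+0x8]
  "418d47fe"  -- lea eax,[r15-0x2]
  "41c0ee03"  -- shr r14b,0x3
  "41c744242800000000"  -- mov DWORD PTR [r12+0x28],0x0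
  "41c7450068000000"  -- mov DWORD PTR [r13+0x0],0x68
  "41c784240400c00007f3f3f3"  -- mov DWORD PTR [r12+0xc00004],0xf3f3f307
  "41c7860400c00004f204f2"  -- mov DWORD PTR [r14+0xc00004],0xf204f204
  "440fb66c2430"  -- movzx r13d,BYTE PTR [rsp+0x30]
  "4421e5"  -- and ebp,r12d
  "448923"  -- mov DWORD PTR [rbx],r12d
  "4489731c"  -- mov DWORD PTR [rbx+0x1c],r14d
  "4489e9"  -- mov ecx,r13d
  "4489f9"  -- mov ecx,r15d
  "448b6d00"  -- mov r13d,DWORD PTR [rbp+0x0]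
  "448b7b08"  -- mov r15d,DWORD PTR [rbx+0x8]
  "45392c24"  -- cmp DWORD PTR [r12],r13d
  "4584ff"  -- test r15b,r15b
  "45887d02"  -- mov BYTE PTR [r13+0x2],r15b
  "45897c2410"  -- mov DWORD PTR [r12+0x10],r15d
  "4801c3"  -- add rbx,rax
  "4829c5"  -- sub rbp,rax
  "48635320"  -- movsxd rdx,DWORD PTR [rbx+0x20]
  "4863f5"  -- movsxd rsi,ebp
  "48837c242000"  -- cmp QWORD PTR [rsp+0x20],0x0
  "4883c468"  -- add rsp,0x68
  "4885c9"  -- test rcx,rcx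
  "48896b48"  -- mov QWORD PTR [rbx+0x48],rbp
  "4889d3"  -- mov rbx,rdx
  "488b1b"  -- mov rbx,QWORD PTR [rbx]
  "488b5c2440"  -- mov rbx,QWORD PTR [rsp+0x40]
  "488b6c2440"  -- mov rbp,QWORD PTR [rsp+0x40]
  "488b7b18"  -- mov rdi,QWORD PTR [rbx+0x18]
  "488d0440"  -- lea rax,[rax+rax*2]
  "488d442450"  -- lea rax,[rsp+0x50]
  "488d6cc500"  -- lea rbp,[rbp+rax*8+0x0]
  "488d7358"  -- lea rsi,[rbx+0x58]
  "488d7b02"  -- lea rdi,[rbx+0x2]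
  "488d7b20"  -- lea rdi,[rbx+0x20]
  "488d7b48"  -- lea rdi,[rbx+0x48]
  "488d7d10"  -- lea rdi,[rbp+0x10]
  "488d7d58"  -- lea rdi,[rbp+0x58]
  "488dbc2d80131400"  -- lea rdi,[rbp+rbp*1+0x141380]
  "48c1ed03"  -- shr rbp,0x3
  "48c744240800141400"  -- mov QWORD PTR [rsp+0x8],0x141400
  "48c7442408a0191400"  -- mov QWORD PTR [rsp+0x8],0x1419a0
  "48c744241080861000"  -- mov QWORD PTR [rsp+0x10],0x108680
  "48c744241800171400"  -- mov QWORD PTR [rsp+0x18],0x141700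
  "48c7442460e06a1000"  -- mov QWORD PTR [rsp+0x60],0x106ae0
  "48c7850000c00000000000"  -- mov QWORD PTR [rbp+0xc00000],0x0
  "4903742420"  -- add rsi,QWORD PTR [r12+0x20]
  "4963df"  -- movsxd rbx,r15d
  "49890f"  -- mov QWORD PTR [r15],rcx
  "4989dc"  -- mov r12,rbx
  "498b5c2440"  -- mov rbx,QWORD PTR [r12+0x40]
  "498d2cc7"  -- lea rbp,[r15+rax*8]
  "498d7c240c"  -- lea rdi,[r12+0xc]
  "498d7c2430"  -- lea rdi,[r12+0x30]
  "498d7d08"  -- lea rdi,[r13+0x8]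
  "498d7e18"  -- lea rdi,[r14+0x18]
  "498d8657110000"  -- lea rax,[r14+0x1157]
  "49c784240000c00000000000"  -- mov QWORD PTR [r12+0xc00000],0x0
  "4c01ed"  -- add rbp,r13
  "4c893b"  -- mov QWORD PTR [rbx],r15
  "4c89742438"  -- mov QWORD PTR [rsp+0x38],r14
  "4c89f7"  -- mov rdi,r14
  "4c8b6508"  -- mov r12,QWORD PTR [rbp+0x8]
  "4c8b7370"  -- mov r14,QWORD PTR [rbx+0x70]
  "4c8b7c2448"  -- mov r15,QWORD PTR [rsp+0x48]
  "4c8d64c3c8"  -- lea r12,[rbx+rax*8-0x38]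
  "4d85f6"  -- test r14,r14
  "4d8d241e"  -- lea r12,[r14+rbx*1]
  "7341"  -- jae 107f87
  "7416"  -- je 107f6e
  "7438"  -- je 10a8ed
  "7452"  -- je 107c5c
  "747e"  -- je 10a8ed
  "74dd"  -- je 108816
  "7516"  -- jne 107f18
  "7533"  -- jne 106eba
  "7815"  -- js 10a279
  "7e2e"  -- jle 1051aa
  "7f10"  -- jg 10787a
  "807c242439"  -- cmp BYTE PTR [rsp+0x24],0x39
  "83c001"  -- add eax,0x1
  "83e508"  -- and ebp,0x8
  "84c2"  -- test dl,al
  "89431c"  -- mov DWORD PTR [rbx+0x1c],eax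
  "89542428"  -- mov DWORD PTR [rsp+0x28],edx
  "89c2"  -- mov edx,eax
  "89da"  -- mov edx,ebx
  "8b1b"  -- mov ebx,DWORD PTR [rbx]
  "8b442420"  -- mov eax,DWORD PTR [rsp+0x20]
  "8b5d20"  -- mov ebx,DWORD PTR [rbp+0x20]
  "8b7328"  -- mov esi,DWORD PTR [rbx+0x28]
  "8d68ff"  -- lea ebp,[rax-0x1]
  "ba18000000"  -- mov edx,0x18
  "bd01000000"  -- mov ebp,0x1
  "bf40121400"  -- mov edi,0x141240
  "c644242600"  -- mov BYTE PTR [rsp+0x26],0x0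
  "c74310ffffffff"  -- mov DWORD PTR [rbx+0x10],0xffffffff
  "c743606d000000"  -- mov DWORD PTR [rbx+0x60],0x6d
  "c7450008000000"  -- mov DWORD PTR [rbp+0x0],0x8
  "c745606c000000"  -- mov DWORD PTR [rbp+0x60],0x6c
  "c7830c00c000f3f3f3f3"  -- mov DWORD PTR [rbx+0xc0000c],0xf3f3f3f3
  "e8015fffff"  -- call 100640
  "e80462ffff"  -- call 1008e0
  "e80959ffff"  -- call 1008e0
  "e80d85ffff"  -- call 100800
  "e81177ffff"  -- call 100800
  "e8155fffff"  -- call 100720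
  "e81872ffff"  -- call 100fc0
  "e81f8affff"  -- call 100800
  "e823fbffff"  -- call 107a80
  "e82759ffff"  -- call 100720
  "e82baeffff"  -- call 100640
  "e82fa6ffff"  -- call 100800
  "e831a1ffff"  -- call 100720
  "e83360ffff"  -- call 100720
  "e83676ffff"  -- call 100640
  "e83bafffff"  -- call 100300
  "e840f8ffff"  -- call 10a1e0
  "e8439dffff"  -- call 100640
  "e84671ffff"  -- call 100720
  "e8488affff"  -- call 100800
  "e84d5affff"  -- call 100d60
  "e85277ffff"  -- call 100800
  "e8575affff"  -- call 1008e0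
  "e85d57ffff"  -- call 100720
  "e8616bffff"  -- call 100640
  "e86685ffff"  -- call 100800
  "e86a5cffff"  -- call 100640
  "e86d57ffff"  -- call 100720
  "e871b8ffff"  -- call 103800
  "e876e2ffff"  -- call 107760
  "e87b5affff"  -- call 100300
  "e8809dffff"  -- call 100300
  "e888e9ffff"  -- call 107a80
  "e88ab1ffff"  -- call 100640
  "e88de0ffff"  -- call 107da0
  "e896e3ffff"  -- call 107900
  "e8999dffff"  -- call 100300
  "e8a0a6ffff"  -- call 100720
  "e8a5dcffff"  -- call 105f20
  "e8ac66ffff"  -- call 100720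
  "e8ad9affff"  -- call 100720
  "e8b085ffff"  -- call 100720
  "e8b49affff"  -- call 103800
  "e8b7a8ffff"  -- call 100800
  "e8ba9cffff"  -- call 100800
  "e8befaffff"  -- call 1052e0
  "e8c37fffff"  -- call 100720
  "e8c765ffff"  -- call 100800
  "e8ca84ffff"  -- call 100800
  "e8ce9affff"  -- call 100720
  "e8d4cfffff"  -- call 107760
  "e8d8faffff"  -- call 1052e0
  "e8de80ffff"  -- call 1003c0
  "e8e183ffff"  -- call 100640
  "e8e563ffff"  -- call 100640
  "e8ea6bffff"  -- call 100720
  "e8efadffff"  -- call 100300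
  "e8f4fcffff"  -- call 105240
  "e8f9b9ffff"  -- call 103800
  "e904ffffff"  -- jmp 106f75
  "e931010000"  -- jmp 10a82a
  "e94bffffff"  -- jmp 106874
  "e967ffffff"  -- jmp 108bf5
  "e995fdffff"  -- jmp 108e78
  "e9bf010000"  -- jmp 10709d
  "eb12"  -- jmp 1079ac
  "eb63"  -- jmp 105558
  "eba6"  -- jmp 109d6e
  "ebb7"  -- jmp 108bf5
  "ebd2"  -- jmp 105177
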